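-- pv_equiv track=rewrite | github.com/senumulapally/DataStructures | SlidingWindow/FixedWindow.py | printLastNumber
-- ===== SOURCE A (Python) =====
-- def printLastNumber(nums, k):
--     low = 0
--     high = 0
--     output = []
--     n = len(nums)
--     while high < n:
--         if high-low+1 < k:
--             high = high + 1
--             continue
--
--         output.append(nums[high])
--
--         low = low + 1
--         high = high + 1
--
--     return output
-- ===== SOURCE B (Python) =====
-- def printLastNumber(nums, k):
--     return nums[max(k - 1, 0):]
-- ===== Notes on version B (the rewrite author's own statement) =====
-- stated objective: simpler
-- what changed: Replaces the two-pointer while-loop that appends elements one by one with a single closed-form slice nums[max(k-1,0):].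
import Mathlib
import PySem

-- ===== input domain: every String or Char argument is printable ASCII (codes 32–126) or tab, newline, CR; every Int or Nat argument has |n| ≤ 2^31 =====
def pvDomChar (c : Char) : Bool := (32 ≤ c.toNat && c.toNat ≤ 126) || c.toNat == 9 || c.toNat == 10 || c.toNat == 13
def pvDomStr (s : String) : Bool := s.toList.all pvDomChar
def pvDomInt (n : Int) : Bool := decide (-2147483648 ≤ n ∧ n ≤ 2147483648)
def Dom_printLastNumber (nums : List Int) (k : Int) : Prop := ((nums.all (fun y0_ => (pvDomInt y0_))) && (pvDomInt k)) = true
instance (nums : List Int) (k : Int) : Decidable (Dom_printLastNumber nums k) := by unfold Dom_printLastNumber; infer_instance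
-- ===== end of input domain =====

-- B replaces A's two-pointer while-loop with the single slice nums[max(k-1,0):] (simpler; return value only).

-- ===== PORT A =====
-- the while loop of A, state (low, high, output); terminates since high strictly increases towards len(nums)
def printLastNumberLoop (nums : List Int) (k : Int) (low high : Int) (output : List Int) : List Int :=
  if h : high < (nums.length : Int) then
    if high - low + 1 < k then
      printLastNumberLoop nums k low (high + 1) output
    else
      -- nums[high]: high is a valid nonnegative index here whenever reached from the initial state
      printLastNumberLoop nums k (low + 1) (high + 1) (output ++ [PySem.List.pyGetD nums high 0])
  else
    output
termination_by ((nums.length : Int) - high).toNat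
decreasing_by all_goals omega

def printLastNumber (nums : List Int) (k : Int) : List Int :=
  printLastNumberLoop nums k 0 0 []

-- ===== PORT B =====
def printLastNumber_alt (nums : List Int) (k : Int) : List Int :=
  PySem.List.slice nums (some (max (k - 1) 0)) none

-- ===== PRECONDITION & SPEC =====
def Spec_printLastNumber (nums : List Int) (k : Int) (out : List Int) : Prop := out = printLastNumber_alt nums k
instance (nums : List Int) (k : Int) (out : List Int) : Decidable (Spec_printLastNumber nums k out) := by unfold Spec_printLastNumber; infer_instance

-- ===== CLAIM (what is proved, stated in full; the proofs are below) =====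
def Claim_equal_printLastNumber : Prop := ∀ (nums : List Int) (k : Int), Dom_printLastNumber nums k → Spec_printLastNumber nums k (printLastNumber nums k)

-- ===== LEMMAS AND PROOFS =====

-- Phase 2: once the window has reached size ≥ k, low/high move together, so the guard
-- stays false and the loop appends every remaining element: output ++ drop high.
theorem printLastNumberLoop_full (nums : List Int) (k : Int) :
    ∀ m (low high : Int) (output : List Int),
      ((nums.length : Int) - high).toNat = m → 0 ≤ high → k ≤ high - low + 1 →
      printLastNumberLoop nums k low high output = output ++ nums.drop high.toNat := by
  intro m
  induction m with
  | zero =>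
    intro low high output hm h0 hk
    rw [printLastNumberLoop]
    have : ¬ high < (nums.length : Int) := by omega
    simp [this]
    omega
  | succ m ih =>
    intro low high output hm h0 hk
    rw [printLastNumberLoop]
    have hlt : high < (nums.length : Int) := by omega
    have hgd : ¬ (high - low + 1 < k) := by omega
    simp only [hlt, dif_pos, hgd, if_neg, not_false_iff]
    rw [ih (low + 1) (high + 1) _ (by omega) (by omega) (by omega)]
    have hnat : high.toNat < nums.length := by omega
    have h1 : (high + 1).toNat = high.toNat + 1 := by omega
    rw [PySem.List.pyGetD_eq_getElem nums 0 h0 hlt, h1, List.drop_eq_getElem_cons hnat]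
    simp

-- Phase 1: while low = 0 and high ≤ k-1, the guard is true and high just advances;
-- the loop ends up returning drop (k-1) of nums (also when the list runs out first).
theorem printLastNumberLoop_warm (nums : List Int) (k : Int) :
    ∀ m (high : Int) (output : List Int),
      ((nums.length : Int) - high).toNat = m → 0 ≤ high → high ≤ k - 1 →
      printLastNumberLoop nums k 0 high output = output ++ nums.drop (k - 1).toNat := by
  intro m
  induction m with
  | zero =>
    intro high output hm h0 hk
    rw [printLastNumberLoop]
    have : ¬ high < (nums.length : Int) := by omega
    simp [this]
    omega
  | succ m ih =>
    intro high output hm h0 hk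
    rw [printLastNumberLoop]
    have hlt : high < (nums.length : Int) := by omega
    by_cases hc : high - 0 + 1 < k
    · simp only [hlt, dif_pos, hc, if_pos]
      exact ih (high + 1) output (by omega) (by omega) (by omega)
    · simp only [hlt, dif_pos, hc, if_neg, not_false_iff]
      have hhk : high = k - 1 := by omega
      rw [printLastNumberLoop_full nums k _ (0 + 1) (high + 1) _ rfl (by omega) (by omega)]
      have hnat : high.toNat < nums.length := by omega
      have h1 : (high + 1).toNat = high.toNat + 1 := by omega
      rw [PySem.List.pyGetD_eq_getElem nums 0 h0 hlt, ← hhk, h1, List.drop_eq_getElem_cons hnat]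
      simp

-- ===== VERDICT (by name: the statement is the Claim_ definition above) =====
theorem printLastNumber_spec : Claim_equal_printLastNumber := by
  intro nums k _
  unfold Spec_printLastNumber printLastNumber printLastNumber_alt
  rw [PySem.List.slice_from nums (by omega)]
  by_cases hk : k ≤ 1
  · rw [printLastNumberLoop_full nums k _ 0 0 [] rfl (by omega) (by omega)]
    have : max (k - 1) 0 = 0 := by omega
    simp [this]
  · rw [printLastNumberLoop_warm nums k _ 0 [] rfl (by omega) (by omega)]
    have : max (k - 1) 0 = k - 1 := by omega
    simp [this]
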